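-- pv_equiv track=rewrite | github.com/Jenny-PL/unit_1_notes | higher_order_functions.py | get_max_with_ties_for_len
-- ===== SOURCE A (Python) =====
-- def get_max_with_ties_for_len(data):
--     best = []
--     best_score = None
--     for item in data:
--         score = len(item)
--         if best_score is None or score > best_score:
--             best = [item]
--             best_score = score
--         elif score == best_score:
--             best.append(item)
--     return best
-- ===== SOURCE B (Python) =====
-- def get_max_with_ties_for_len(data):
--     if not data:
--         return []
--     max_len = max(len(item) for item in data)
--     return [item for item in data if len(item) == max_len]
-- ===== Notes on version B (the rewrite author's own statement) =====
-- stated objective: simpler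
-- what changed: Replaces A's single fused pass maintaining a best-list and best-score with an empty guard plus two plain passes: compute max length, then filter by it.
import Mathlib
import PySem

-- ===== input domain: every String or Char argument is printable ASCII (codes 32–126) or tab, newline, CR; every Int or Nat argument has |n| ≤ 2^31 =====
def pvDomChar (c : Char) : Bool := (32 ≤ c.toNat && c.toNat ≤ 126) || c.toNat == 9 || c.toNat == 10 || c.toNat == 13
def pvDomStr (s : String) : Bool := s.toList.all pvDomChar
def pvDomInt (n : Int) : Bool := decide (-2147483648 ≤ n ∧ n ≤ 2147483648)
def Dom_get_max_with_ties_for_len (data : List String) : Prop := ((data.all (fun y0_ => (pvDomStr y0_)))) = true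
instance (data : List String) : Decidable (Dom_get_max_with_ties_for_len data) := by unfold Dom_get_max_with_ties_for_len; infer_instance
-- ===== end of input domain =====

-- B replaces A's single fused best-list/best-score pass with an empty guard,
-- a max-length pass, and a filter pass (objective: simpler).


-- ===== PORT A =====
-- the for-loop of A: state is (best, best_score)
def pvLoopA : List String → List String → Option Nat → List String
  | [], best, _ => best
  | item :: rest, best, best_score =>
    let score := item.length
    match best_score with
    | none => pvLoopA rest [item] (some score)
    | some b =>
      if score > b then pvLoopA rest [item] (some score)
      else if score == b then pvLoopA rest (best ++ [item]) (some b)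
      else pvLoopA rest best (some b)

def get_max_with_ties_for_len (data : List String) : List String :=
  pvLoopA data [] none

-- ===== PORT B =====
def get_max_with_ties_for_len_alt (data : List String) : List String :=
  match data with
  | [] => []
  | d :: ds =>
    -- max(len(item) for item in data): fold of max over the lengths
    let max_len := (ds.map String.length).foldl max d.length
    (d :: ds).filter (fun item => item.length == max_len)

-- ===== PRECONDITION & SPEC =====
def Spec_get_max_with_ties_for_len (data : List String) (out : List String) : Prop := out = get_max_with_ties_for_len_alt data
instance (data : List String) (out : List String) : Decidable (Spec_get_max_with_ties_for_len data out) := by unfold Spec_get_max_with_ties_for_len; infer_instance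

-- ===== CLAIM (what is proved, stated in full; the proofs are below) =====
def Claim_equal_get_max_with_ties_for_len : Prop := ∀ (data : List String), Dom_get_max_with_ties_for_len data → Spec_get_max_with_ties_for_len data (get_max_with_ties_for_len data)

-- ===== LEMMAS AND PROOFS =====

-- the fold of max never drops below its seed
theorem pvFoldMax_le (l : List Nat) : ∀ (b : Nat), b ≤ l.foldl max b := by
  induction l with
  | nil => intro b; simp
  | cons a t ih => intro b; exact le_trans (le_max_left b a) (ih (max b a))

-- loop invariant: with current best score b and current best list `best`,
-- the loop returns the kept prefix (iff the max does not improve) followed by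
-- the suffix elements whose length attains the overall running maximum.
theorem pvLoopA_some (rest : List String) : ∀ (b : Nat) (best : List String),
    pvLoopA rest best (some b) =
      (if (rest.map String.length).foldl max b = b then best else [])
        ++ rest.filter (fun item => item.length == (rest.map String.length).foldl max b) := by
  induction rest with
  | nil => intro b best; simp [pvLoopA]
  | cons item more ih =>
    intro b best
    simp only [List.map_cons, List.foldl_cons, List.filter_cons]
    by_cases h : item.length > b
    · have hmax : max b item.length = item.length := by omega
      have hge : item.length ≤ (more.map String.length).foldl max item.length :=
        pvFoldMax_le _ _
      simp only [pvLoopA, if_pos h]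
      rw [ih]
      simp only [hmax]
      have hne : (more.map String.length).foldl max item.length ≠ b := by omega
      rw [if_neg hne]
      by_cases he : (more.map String.length).foldl max item.length = item.length
      · simp [he]
      · have : (item.length == (more.map String.length).foldl max item.length) = false := by
          simp; omega
        simp [this, if_neg he]
    · have hmax : max b item.length = b := by omega
      simp only [hmax]
      by_cases he : item.length = b
      · have hgeb : b ≤ (more.map String.length).foldl max b := pvFoldMax_le _ _
        simp only [pvLoopA, he, beq_self_eq_true, if_true]
        rw [ih b (best ++ [item])]
        by_cases hm : (more.map String.length).foldl max b = b
        · simp [hm]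
        · have h1 : (b == (more.map String.length).foldl max b) = false := by simp; omega
          simp [hm, h1]
      · have hlt : item.length < b := by omega
        have hif : (item.length == b) = false := by simp; omega
        simp only [pvLoopA, if_neg h, hif, if_neg, Bool.false_eq_true, not_false_eq_true]
        rw [ih]
        have hgeb : b ≤ (more.map String.length).foldl max b := pvFoldMax_le _ _
        have : (item.length == (more.map String.length).foldl max b) = false := by
          simp; omega
        simp [this]

theorem get_max_with_ties_for_len_spec : Claim_equal_get_max_with_ties_for_len := by
  intro data _
  unfold Spec_get_max_with_ties_for_len get_max_with_ties_for_len get_max_with_ties_for_len_alt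
  match data with
  | [] => simp [pvLoopA]
  | d :: ds =>
    simp only [pvLoopA]
    rw [pvLoopA_some]
    simp only [List.filter_cons]
    have hge : d.length ≤ (ds.map String.length).foldl max d.length := pvFoldMax_le _ _
    by_cases he : (ds.map String.length).foldl max d.length = d.length
    · simp [he]
    · have : (d.length == (ds.map String.length).foldl max d.length) = false := by simp; omega
      simp [he, this]
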